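-- pv_equiv track=rewrite | github.com/SimonSlansky/bachelor-thesis-nlp-financial-filings | tests/test_text_extraction_v3.py | _longest_gap_start
-- ===== SOURCE A (Python) =====
-- def _longest_gap_start(text: str, candidates: list[int],
--                        positions: dict[str, list[int]],
--                        target_item: str) -> int | None:
--     """Among candidates, return the one with the longest gap to next different item."""
--     if not candidates:
--         return None
--
--     other = sorted(
--         p for item_id, ps in positions.items()
--         if item_id != target_item
--         for p in ps
--     )
--
--     best, best_gap = None, -1
--     for cand in candidates:
--         gap = len(text) - cand
--         for op in other:
--             if op > cand + 50:
--                 gap = op - cand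
--                 break
--         if gap > best_gap:
--             best_gap = gap
--             best = cand
--     return best
-- ===== SOURCE B (Python) =====
-- def _longest_gap_start(text: str, candidates: list[int],
--                        positions: dict[str, list[int]],
--                        target_item: str) -> int | None:
--     """Among candidates, return the one with the longest gap to next different item."""
--     if not candidates:
--         return None
--
--     other = sorted(p for item_id, ps in positions.items()
--                    if item_id != target_item
--                    for p in ps)
--     n_text = len(text)
--     n_other = len(other)
--
--     def first_above(x: int) -> int:
--         # index of the first element of `other` strictly greater than x
--         lo, hi = 0, n_other
--         while lo < hi:
--             mid = (lo + hi) // 2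
--             if other[mid] > x:
--                 hi = mid
--             else:
--                 lo = mid + 1
--         return lo
--
--     best, best_gap = None, -1
--     for cand in candidates:
--         i = first_above(cand + 50)
--         gap = (other[i] if i < n_other else n_text) - cand
--         if gap > best_gap:
--             best_gap = gap
--             best = cand
--     return best
-- ===== Notes on version B (the rewrite author's own statement) =====
-- stated objective: faster
-- what changed: B replaces A's inner linear scan of the sorted 'other' positions with a hand-written binary search for the first position > cand+50, turning O(C*O) candidate processing into O(C*log O) after the sort.
import Mathlib
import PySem

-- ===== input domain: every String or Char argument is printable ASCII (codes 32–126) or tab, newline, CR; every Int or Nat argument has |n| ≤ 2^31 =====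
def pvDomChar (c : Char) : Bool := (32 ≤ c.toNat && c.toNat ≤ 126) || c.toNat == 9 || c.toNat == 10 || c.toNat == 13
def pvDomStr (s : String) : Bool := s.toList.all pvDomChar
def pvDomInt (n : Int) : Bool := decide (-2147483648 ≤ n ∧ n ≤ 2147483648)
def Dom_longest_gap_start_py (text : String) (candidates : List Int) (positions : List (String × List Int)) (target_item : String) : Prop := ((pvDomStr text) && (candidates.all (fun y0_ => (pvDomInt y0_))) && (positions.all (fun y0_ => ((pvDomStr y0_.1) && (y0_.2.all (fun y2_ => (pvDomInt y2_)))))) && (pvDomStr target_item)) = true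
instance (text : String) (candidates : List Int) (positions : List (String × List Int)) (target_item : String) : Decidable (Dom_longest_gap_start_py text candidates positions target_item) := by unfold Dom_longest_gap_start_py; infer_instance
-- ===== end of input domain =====

-- B replaces A's inner linear scan of the sorted `other` list by a binary search
-- for the first position > cand + 50 (objective: faster, asymptotic in the inner step).

-- ===== PORT A =====
-- inner `for op in other: if op > cand + 50: gap = op - cand; break`
def pvFindGapA : List Int → Int → Int → Int
  | [], _, g => g
  | op :: rest, c, g => if op > c + 50 then op - c else pvFindGapA rest c g

def longest_gap_start_py (text : String) (candidates : List Int) (positions : List (String × List Int)) (target_item : String) : Option Int :=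
  if candidates = [] then none
  else
    let other := PySem.List.sorted ((positions.filter (fun kv => kv.1 != target_item)).flatMap (fun kv => kv.2)) (fun x => x) false
    let r := candidates.foldl (fun (st : Option Int × Int) cand =>
        let gap := pvFindGapA other cand (PySem.Str.len text - cand)
        if gap > st.2 then (some cand, gap) else st) (none, -1)
    r.1

-- ===== PORT B =====
-- hand-written binary search of Source B: first index in `other` (sorted) whose value is > x
-- (other[mid] is always in range since lo < hi ≤ len; ported as getD with default 0, exact there)
def pvFirstAbove (other : List Int) (x : Int) (lo hi : Nat) : Nat :=
  if h : lo < hi then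
    if other.getD ((lo + hi) / 2) 0 > x then pvFirstAbove other x lo ((lo + hi) / 2)
    else pvFirstAbove other x ((lo + hi) / 2 + 1) hi
  else lo
termination_by hi - lo
decreasing_by all_goals omega

def longest_gap_start_py_alt (text : String) (candidates : List Int) (positions : List (String × List Int)) (target_item : String) : Option Int :=
  if candidates = [] then none
  else
    let other := PySem.List.sorted ((positions.filter (fun kv => kv.1 != target_item)).flatMap (fun kv => kv.2)) (fun x => x) false
    let nOther := other.length
    let r := candidates.foldl (fun (st : Option Int × Int) cand =>
        let i := pvFirstAbove other (cand + 50) 0 nOther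
        let gap := (if i < nOther then other.getD i 0 else PySem.Str.len text) - cand
        if gap > st.2 then (some cand, gap) else st) (none, -1)
    r.1

-- ===== PRECONDITION & SPEC =====
def Spec_longest_gap_start_py (text : String) (candidates : List Int) (positions : List (String × List Int)) (target_item : String) (out : Option Int) : Prop := out = longest_gap_start_py_alt text candidates positions target_item
instance (text : String) (candidates : List Int) (positions : List (String × List Int)) (target_item : String) (out : Option Int) : Decidable (Spec_longest_gap_start_py text candidates positions target_item out) := by unfold Spec_longest_gap_start_py; infer_instance

-- ===== CLAIM (what is proved, stated in full; the proofs are below) =====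
def Claim_equal_longest_gap_start_py : Prop := ∀ (text : String) (candidates : List Int) (positions : List (String × List Int)) (target_item : String), Dom_longest_gap_start_py text candidates positions target_item → Spec_longest_gap_start_py text candidates positions target_item (longest_gap_start_py text candidates positions target_item)

-- ===== LEMMAS AND PROOFS =====

theorem pvGetD_mono (l : List Int) (hs : l.Pairwise (· ≤ ·)) (i j : Nat)
    (hij : i ≤ j) (hj : j < l.length) : l.getD i 0 ≤ l.getD j 0 := by
  rcases Nat.lt_or_ge i j with h | h
  · rw [List.getD_eq_getElem l 0 (lt_trans h hj), List.getD_eq_getElem l 0 hj]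
    exact List.pairwise_iff_getElem.mp hs i j _ _ h
  · have : i = j := le_antisymm hij h
    simp [this]

theorem pvFirstAbove_props (l : List Int) (x : Int) (hs : l.Pairwise (· ≤ ·)) :
    ∀ (lo hi : Nat), hi ≤ l.length → lo ≤ hi →
    (∀ j, j < lo → l.getD j 0 ≤ x) →
    (∀ j, hi ≤ j → j < l.length → x < l.getD j 0) →
    pvFirstAbove l x lo hi ≤ l.length ∧
    (∀ j, j < pvFirstAbove l x lo hi → l.getD j 0 ≤ x) ∧
    (∀ j, pvFirstAbove l x lo hi ≤ j → j < l.length → x < l.getD j 0) := by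
  intro lo hi hhi hlohi hlow hhigh
  unfold pvFirstAbove
  split
  · next h =>
    split
    · next hmid =>
      exact pvFirstAbove_props l x hs lo ((lo + hi) / 2)
        (le_trans (by omega) hhi) (by omega) hlow
        (fun j hj hjl => lt_of_lt_of_le hmid (pvGetD_mono l hs _ j hj hjl))
    · next hmid =>
      rw [not_lt] at hmid
      exact pvFirstAbove_props l x hs ((lo + hi) / 2 + 1) hi hhi (by omega)
        (fun j hj => by
          rcases Nat.lt_or_ge j lo with h' | h'
          · exact hlow j h'
          · exact le_trans (pvGetD_mono l hs j ((lo + hi) / 2) (by omega) (by omega)) hmid)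
        hhigh
  · next h =>
    have : lo = hi := by omega
    subst this
    exact ⟨le_trans hlohi hhi, hlow, hhigh⟩
termination_by lo hi => hi - lo
decreasing_by all_goals omega

theorem pvFindGapA_spec (l : List Int) (c g : Int) (i : Nat)
    (hle : i ≤ l.length)
    (hlow : ∀ j, j < i → l.getD j 0 ≤ c + 50)
    (hhigh : ∀ j, i ≤ j → j < l.length → c + 50 < l.getD j 0) :
    pvFindGapA l c g = if i < l.length then l.getD i 0 - c else g := by
  induction l generalizing i g with
  | nil =>
    have : i = 0 := by simpa using hle
    simp [pvFindGapA, this]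
  | cons op rest ih =>
    cases i with
    | zero =>
      have h0 : c + 50 < op := by
        have := hhigh 0 (Nat.zero_le _) (by simp)
        simpa using this
      simp [pvFindGapA, h0]
    | succ k =>
      have hop : op ≤ c + 50 := by simpa using hlow 0 (Nat.succ_pos k)
      have hnot : ¬ op > c + 50 := by omega
      have := ih g k (by simpa using hle)
        (fun j hj => by simpa using hlow (j+1) (by omega))
        (fun j hj hjl => by
          have := hhigh (j+1) (by omega) (by simpa using hjl)
          simpa using this)
      simp only [pvFindGapA, hnot, if_false, this]
      simp

-- ===== VERDICT (by name: the statement is the Claim_ definition above) =====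
theorem longest_gap_start_py_spec : Claim_equal_longest_gap_start_py := by
  intro text candidates positions target_item _
  unfold Spec_longest_gap_start_py longest_gap_start_py longest_gap_start_py_alt
  by_cases hc : candidates = []
  · simp [hc]
  · simp only [hc, if_false]
    set other := PySem.List.sorted ((positions.filter (fun kv => kv.1 != target_item)).flatMap (fun kv => kv.2)) (fun x => x) false with hother
    have hs : other.Pairwise (· ≤ ·) := by
      simpa using PySem.List.sorted_pairwise ((positions.filter (fun kv => kv.1 != target_item)).flatMap (fun kv => kv.2)) (fun x => x)
    have hfun : ∀ (st : Option Int × Int) (cand : Int),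
        (if pvFindGapA other cand (PySem.Str.len text - cand) > st.2 then
          (some cand, pvFindGapA other cand (PySem.Str.len text - cand)) else st) =
        (if (if pvFirstAbove other (cand + 50) 0 other.length < other.length then
              other.getD (pvFirstAbove other (cand + 50) 0 other.length) 0
            else PySem.Str.len text) - cand > st.2 then
          (some cand,
            (if pvFirstAbove other (cand + 50) 0 other.length < other.length then
              other.getD (pvFirstAbove other (cand + 50) 0 other.length) 0
            else PySem.Str.len text) - cand)
        else st) := by
      intro st cand
      have hprops := pvFirstAbove_props other (cand + 50) hs 0 other.length le_rfl (Nat.zero_le _)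
        (fun j hj => absurd hj (Nat.not_lt_zero j)) (fun j hj hjl => absurd hjl (by omega))
      have hgap := pvFindGapA_spec other cand (PySem.Str.len text - cand)
        (pvFirstAbove other (cand + 50) 0 other.length) hprops.1 hprops.2.1 hprops.2.2
      simp only [hgap, apply_ite (fun t : Int => t - cand)]
    simp only [hfun]
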